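-- pv_equiv track=rewrite | github.com/milgrig/androidgame | TheSymmetryVaults/tests/fast/unit/test_room_map_panel.py | compute_bfs
-- ===== SOURCE A (Python) =====
-- def compute_bfs(cayley_table: list[list[int]], n: int) -> list[int]:
--     """BFS from room 0 using all non-identity keys."""
--     dist = [999] * n
--     dist[0] = 0
--     queue = [0]
--     visited = {0}
--     qi = 0
--     while qi < len(queue):
--         v = queue[qi]
--         qi += 1
--         for k in range(1, n):  # skip key 0 (identity)
--             nxt = cayley_table[v][k]
--             if nxt not in visited:
--                 visited.add(nxt)
--                 dist[nxt] = dist[v] + 1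
--                 queue.append(nxt)
--     return dist
-- ===== SOURCE B (Python) =====
-- def compute_bfs(cayley_table: list[list[int]], n: int) -> list[int]:
--     """BFS distances from room 0: first build the BFS layers, then write levels."""
--     dist = [999] * n
--     dist[0] = 0
--     seen = {0}
--     layers = [[0]]
--     while layers[-1]:
--         cand = [cayley_table[v][k] for v in layers[-1] for k in range(1, n)]
--         nxt = []
--         for w in cand:
--             if w not in seen:
--                 seen.add(w)
--                 nxt.append(w)
--         layers.append(nxt)
--     for level, layer in enumerate(layers):
--         for v in layer:
--             dist[v] = level
--     return dist
-- ===== Notes on version B (the rewrite author's own statement) =====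
-- stated objective: alternative
-- what changed: Two-phase algorithm: first builds the list of BFS layers (candidate comprehension per layer, then a dedup-filter pass) with no distance array involved, then a second enumerate pass writes each node's level into dist; A interleaves distance writes with a single growing queue and a read cursor.
-- outside the precondition, e.g. on compute_bfs([[0, -3, 2], [0, 0, 0], [0, 1, 0]], 3): A returns [1, 3, 2], B returns [1, 2, 1]
import Mathlib
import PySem

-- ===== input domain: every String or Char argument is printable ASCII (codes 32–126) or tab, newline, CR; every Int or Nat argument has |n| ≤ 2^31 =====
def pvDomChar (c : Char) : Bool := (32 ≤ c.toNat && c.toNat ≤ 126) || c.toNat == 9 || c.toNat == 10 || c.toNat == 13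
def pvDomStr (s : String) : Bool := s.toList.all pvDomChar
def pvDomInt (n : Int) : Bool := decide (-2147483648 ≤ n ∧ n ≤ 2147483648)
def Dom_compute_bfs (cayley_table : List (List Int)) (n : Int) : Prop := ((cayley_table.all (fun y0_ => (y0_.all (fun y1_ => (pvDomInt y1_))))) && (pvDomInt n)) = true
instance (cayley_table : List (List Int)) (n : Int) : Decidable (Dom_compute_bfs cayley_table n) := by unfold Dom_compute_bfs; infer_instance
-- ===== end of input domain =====

-- B computes the BFS layers first (candidate comprehension + dedup-filter pass per layer,
-- no distance array involved) and only then writes each node's level into dist in a second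
-- enumerate pass; A interleaves distance writes with one growing queue and a read cursor.

-- ===== PORT A =====
-- inner 'for k in range(1, n)' body of A; state = (dist, visited, queue)
def pvAInner (t : List (List Int)) (v : Int)
    (st : List Int × PySem.Set Int × List Int) (k : Int) :
    List Int × PySem.Set Int × List Int :=
  let nxt := PySem.List.pyGetD (PySem.List.pyGetD t v []) k 0
  if PySem.Set.contains st.2.1 nxt then st
  else (PySem.List.pySetD st.1 nxt (PySem.List.pyGetD st.1 v 999 + 1),
        PySem.Set.add st.2.1 nxt, st.2.2 ++ [nxt])

-- A's 'while qi < len(queue)' loop; the fuel only makes the recursion total (enough on Pre_)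
def pvALoop (t : List (List Int)) (n : Int) :
    Nat → List Int → PySem.Set Int → List Int → Nat → List Int
  | 0, dist, _, _, _ => dist
  | fuel+1, dist, visited, queue, qi =>
    if h : qi < queue.length then
      let st := (PySem.List.pyRange 1 n).foldl (pvAInner t queue[qi]) (dist, visited, queue)
      pvALoop t n fuel st.1 st.2.1 st.2.2 (qi+1)
    else dist

def compute_bfs (cayley_table : List (List Int)) (n : Int) : List Int :=
  let dist := PySem.List.pySetD (List.replicate n.toNat 999) 0 0
  pvALoop cayley_table n (n.toNat + 1) dist (PySem.Set.ofList [0]) [0] 0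

-- ===== PORT B =====
-- the comprehension '[cayley_table[v][k] for v in layers[-1] for k in range(1, n)]'
def pvCand (t : List (List Int)) (n : Int) (frontier : List Int) : List Int :=
  frontier.flatMap (fun v =>
    (PySem.List.pyRange 1 n).map (fun k => PySem.List.pyGetD (PySem.List.pyGetD t v []) k 0))

-- body of B's 'for w in cand' filter loop; state = (seen, nxt)
def pvNewStep (st : PySem.Set Int × List Int) (w : Int) : PySem.Set Int × List Int :=
  if PySem.Set.contains st.1 w then st else (PySem.Set.add st.1 w, st.2 ++ [w])

-- B's dedup-filter pass: the unseen candidates, in order, plus the updated seen set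
def pvNewOf (cand : List Int) (seen : PySem.Set Int) : PySem.Set Int × List Int :=
  cand.foldl pvNewStep (seen, [])

-- B's 'while layers[-1]' loop, returning the whole layers list (last layer is empty);
-- the fuel only makes the recursion total (enough on Pre_)
def pvLayersLoop (t : List (List Int)) (n : Int) :
    Nat → PySem.Set Int → List Int → List (List Int)
  | 0, _, last => [last]
  | fuel+1, seen, last =>
    if last.isEmpty then [last]
    else
      let p := pvNewOf (pvCand t n last) seen
      last :: pvLayersLoop t n fuel p.1 p.2

def compute_bfs_alt (cayley_table : List (List Int)) (n : Int) : List Int :=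
  let dist := PySem.List.pySetD (List.replicate n.toNat 999) 0 0
  let layers := pvLayersLoop cayley_table n (n.toNat + 1) (PySem.Set.ofList [0]) [0]
  (PySem.List.enumerate layers).foldl
    (fun d p => p.2.foldl (fun d v => PySem.List.pySetD d v p.1) d) dist

-- ===== PRECONDITION & SPEC =====
-- Pre_ restricts to the natural Cayley-table domain: n ≥ 1 and, when n ≥ 2 (for n = 1 the
-- table is never read), first n rows of length ≥ n with entries in [0,n); outside it A raises
-- IndexError or returns values produced by accidental negative-index wraparound.
def Pre_compute_bfs (cayley_table : List (List Int)) (n : Int) : Prop :=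
  0 < n ∧ (2 ≤ n → n ≤ cayley_table.length ∧
    ∀ row ∈ cayley_table.take n.toNat,
      n ≤ row.length ∧ ∀ x ∈ row.take n.toNat, 0 ≤ x ∧ x < n)
instance (cayley_table : List (List Int)) (n : Int) : Decidable (Pre_compute_bfs cayley_table n) := by
  unfold Pre_compute_bfs; infer_instance
def pvWitness_compute_bfs : List (List Int) × Int := ([[0, 1], [1, 0]], 2)

def Spec_compute_bfs (cayley_table : List (List Int)) (n : Int) (out : List Int) : Prop := out = compute_bfs_alt cayley_table n
instance (cayley_table : List (List Int)) (n : Int) (out : List Int) : Decidable (Spec_compute_bfs cayley_table n out) := by unfold Spec_compute_bfs; infer_instance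

-- ===== CLAIM (what is proved, stated in full; the proofs are below) =====
def Claim_equal_compute_bfs : Prop := ∀ (cayley_table : List (List Int)) (n : Int), Dom_compute_bfs cayley_table n → Pre_compute_bfs cayley_table n → Spec_compute_bfs cayley_table n (compute_bfs cayley_table n)

-- ===== LEMMAS AND PROOFS =====

-- sequential writes of one value at a list of indices (proof-side abbreviation)
def pvWriteAll (d : List Int) (ws : List Int) (val : Int) : List Int :=
  ws.foldl (fun d w => PySem.List.pySetD d w val) d

-- write layer i at level lvl+i, for all layers (proof-side view of B's second phase)
def pvW (d : List Int) : List (List Int) → Int → List Int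
  | [], _ => d
  | l :: ls, lvl => pvW (pvWriteAll d l lvl) ls (lvl + 1)

theorem pv_enum_fold (ls : List (List Int)) :
    ∀ (d : List Int) (s : Int),
    (PySem.List.enumerate ls s).foldl
      (fun d p => p.2.foldl (fun d v => PySem.List.pySetD d v p.1) d) d = pvW d ls s := by
  induction ls with
  | nil => intro d s; simp [PySem.List.enumerate_nil, pvW]
  | cons l ls ih =>
    intro d s
    rw [PySem.List.enumerate_cons, List.foldl_cons, ih]
    rfl

theorem pv_writeAll_length (ws : List Int) :
    ∀ (d : List Int) (val : Int), (pvWriteAll d ws val).length = d.length := by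
  induction ws with
  | nil => intro d val; rfl
  | cons w ws ih =>
    intro d val
    show (pvWriteAll (PySem.List.pySetD d w val) ws val).length = d.length
    rw [ih, PySem.List.length_pySetD]

-- Python-index read after write, on nonnegative in-range indices
theorem pv_getD_setD (xs : List Int) (i j v : Int) (hi : 0 ≤ i) (hj : 0 ≤ j)
    (hil : i.toNat < xs.length) :
    PySem.List.pyGetD (PySem.List.pySetD xs i v) j 999 =
      if j = i then v else PySem.List.pyGetD xs j 999 := by
  rw [← Int.toNat_of_nonneg hi, ← Int.toNat_of_nonneg hj,
    PySem.List.pyGetD_pySetD_natCast _ _ _ _ _ hil]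
  by_cases h : j.toNat = i.toNat
  · simp [h]
  · rw [if_neg h, if_neg (by omega)]

theorem pv_getD_writeAll (ws : List Int) :
    ∀ (d : List Int) (val x : Int), (∀ w ∈ ws, 0 ≤ w ∧ w.toNat < d.length) → 0 ≤ x →
    PySem.List.pyGetD (pvWriteAll d ws val) x 999 =
      if x ∈ ws then val else PySem.List.pyGetD d x 999 := by
  induction ws with
  | nil => intro d val x _ _; simp [pvWriteAll]
  | cons w ws ih =>
    intro d val x hb hx
    have hw := hb w (by simp)
    have hrec : pvWriteAll d (w :: ws) val = pvWriteAll (PySem.List.pySetD d w val) ws val := rfl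
    rw [hrec, ih _ val x (by
      intro u hu
      have := hb u (by simp [hu])
      rw [PySem.List.length_pySetD]; exact this) hx]
    by_cases hm : x ∈ ws
    · simp [hm]
    · rw [if_neg hm, pv_getD_setD d w x val hw.1 hx hw.2]
      by_cases hxw : x = w
      · simp [hxw]
      · simp [hxw, hm]

-- setting an index to the value it already holds is a no-op
theorem pv_pySetD_self (d : List Int) (w val : Int) (h0 : 0 ≤ w) (hl : w.toNat < d.length)
    (hv : PySem.List.pyGetD d w 999 = val) : PySem.List.pySetD d w val = d := by
  rw [PySem.List.pySetD_of_nonneg _ _ h0]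
  have hvl : d[w.toNat] = val := by
    rw [← hv, PySem.List.pyGetD_of_nonneg _ _ h0, List.getD_eq_getElem _ _ hl]
  apply List.ext_getElem (by simp)
  intro i h1 h2
  by_cases h : w.toNat = i
  · subst h; simp [List.getElem_set, hvl]
  · simp [List.getElem_set, h]

theorem pv_writeAll_noop (ws : List Int) :
    ∀ (d : List Int) (val : Int),
    (∀ w ∈ ws, 0 ≤ w ∧ w.toNat < d.length ∧ PySem.List.pyGetD d w 999 = val) →
    pvWriteAll d ws val = d := by
  induction ws with
  | nil => intro d val _; rfl
  | cons w ws ih =>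
    intro d val h
    have hw := h w (by simp)
    have : pvWriteAll d (w :: ws) val = pvWriteAll (PySem.List.pySetD d w val) ws val := rfl
    rw [this, pv_pySetD_self d w val hw.1 hw.2.1 hw.2.2]
    exact ih d val (fun u hu => h u (by simp [hu]))

theorem pv_writeAll_append (a b : List Int) (d : List Int) (val : Int) :
    pvWriteAll d (a ++ b) val = pvWriteAll (pvWriteAll d a val) b val := by
  simp [pvWriteAll, List.foldl_append]

-- the accumulator of the filter pass only ever grows at the back
theorem pv_newOf_shift (l : List Int) :
    ∀ (s : PySem.Set Int) (acc : List Int),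
    l.foldl pvNewStep (s, acc) =
      ((l.foldl pvNewStep (s, [])).1, acc ++ (l.foldl pvNewStep (s, [])).2) := by
  induction l with
  | nil => intro s acc; simp
  | cons w l ih =>
    intro s acc
    by_cases hc : PySem.Set.contains s w
    · simp only [List.foldl_cons, pvNewStep, hc, if_true]
      exact ih s acc
    · simp only [List.foldl_cons, pvNewStep, hc, Bool.false_eq_true, if_false,
        List.nil_append]
      rw [ih _ (acc ++ [w]), ih _ [w]]
      simp

theorem pv_newOf_append (a b : List Int) (s : PySem.Set Int) :
    pvNewOf (a ++ b) s =
      ((pvNewOf b (pvNewOf a s).1).1, (pvNewOf a s).2 ++ (pvNewOf b (pvNewOf a s).1).2) := by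
  unfold pvNewOf
  rw [List.foldl_append]
  have : a.foldl pvNewStep (s, []) =
      ((a.foldl pvNewStep (s, [])).1, (a.foldl pvNewStep (s, [])).2) := rfl
  rw [this, pv_newOf_shift b]

-- a nodup list of integers in [0, n) has at most n.toNat elements
theorem pv_nodup_length_le (vis : List Int) (n : Int)
    (hnd : vis.Nodup) (hb : ∀ x ∈ vis, 0 ≤ x ∧ x < n) : vis.length ≤ n.toNat := by
  have h1 : vis.toFinset.card = vis.length := List.toFinset_card_of_nodup hnd
  have h2 : vis.toFinset ⊆ Finset.Ico 0 n := by
    intro x hx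
    simp only [List.mem_toFinset] at hx
    have := hb x hx
    simp [Finset.mem_Ico, this.1, this.2]
  have h3 := Finset.card_le_card h2
  rw [h1] at h3
  simpa using h3

-- the table entry cayley_table[v][k] is a node in [0, n) on the Pre_ domain
theorem pv_nxt_bound (t : List (List Int)) (n v k : Int)
    (hpre : Pre_compute_bfs t n) (hv : 0 ≤ v ∧ v < n) (hk : 1 ≤ k ∧ k < n) :
    0 ≤ PySem.List.pyGetD (PySem.List.pyGetD t v []) k 0 ∧
    PySem.List.pyGetD (PySem.List.pyGetD t v []) k 0 < n := by
  obtain ⟨hn, hrest⟩ := hpre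
  obtain ⟨hlen, hrows⟩ := hrest (by omega)
  have hvt : v.toNat < t.length := by omega
  have hrow : PySem.List.pyGetD t v [] = t[v.toNat] := by
    rw [PySem.List.pyGetD_of_nonneg _ _ hv.1, List.getD_eq_getElem _ _ hvt]
  have hmem : t[v.toNat] ∈ t.take n.toNat := by
    have h1 : v.toNat < (t.take n.toNat).length := by simp; omega
    have h2 : (t.take n.toNat)[v.toNat] = t[v.toNat] := List.getElem_take
    rw [← h2]; exact List.getElem_mem h1
  obtain ⟨hrl, hent⟩ := hrows _ hmem
  have hkr : k.toNat < t[v.toNat].length := by omega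
  have hnxt : PySem.List.pyGetD t[v.toNat] k 0 = t[v.toNat][k.toNat] := by
    rw [PySem.List.pyGetD_of_nonneg _ _ (by omega : (0:Int) ≤ k), List.getD_eq_getElem _ _ hkr]
  have hmem2 : t[v.toNat][k.toNat] ∈ t[v.toNat].take n.toNat := by
    have h1 : k.toNat < (t[v.toNat].take n.toNat).length := by simp; omega
    have h2 : (t[v.toNat].take n.toNat)[k.toNat] = t[v.toNat][k.toNat] := List.getElem_take
    rw [← h2]; exact List.getElem_mem h1
  rw [hrow, hnxt]
  exact hent _ hmem2

-- A's inner k-loop is: take the unseen values of the comprehension, append them to the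
-- queue/visited, and write level+1 at each — exactly B's filter pass on this v's candidates
theorem pv_inner (t : List (List Int)) (n v level : Int) (hpre : Pre_compute_bfs t n) :
    ∀ (ks : List Int), (∀ k ∈ ks, 1 ≤ k ∧ k < n) →
    ∀ (dist vis qa : List Int),
    dist.length = n.toNat →
    (0 ≤ v ∧ v < n) → v ∈ vis →
    vis.Nodup → (∀ x ∈ vis, 0 ≤ x ∧ x < n) →
    PySem.List.pyGetD dist v 999 = level →
    (ks.foldl (pvAInner t v) (dist, vis, qa)) =
      (pvWriteAll dist (pvNewOf (ks.map (fun k => PySem.List.pyGetD (PySem.List.pyGetD t v []) k 0)) vis).2 (level + 1),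
       vis ++ (pvNewOf (ks.map (fun k => PySem.List.pyGetD (PySem.List.pyGetD t v []) k 0)) vis).2,
       qa ++ (pvNewOf (ks.map (fun k => PySem.List.pyGetD (PySem.List.pyGetD t v []) k 0)) vis).2) ∧
    (pvNewOf (ks.map (fun k => PySem.List.pyGetD (PySem.List.pyGetD t v []) k 0)) vis).1 =
      vis ++ (pvNewOf (ks.map (fun k => PySem.List.pyGetD (PySem.List.pyGetD t v []) k 0)) vis).2 ∧
    (vis ++ (pvNewOf (ks.map (fun k => PySem.List.pyGetD (PySem.List.pyGetD t v []) k 0)) vis).2).Nodup ∧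
    (∀ x ∈ (pvNewOf (ks.map (fun k => PySem.List.pyGetD (PySem.List.pyGetD t v []) k 0)) vis).2, 0 ≤ x ∧ x < n) := by
  intro ks
  induction ks with
  | nil =>
    intro _ dist vis qa hlen _ _ hnd _ _
    refine ⟨by simp [pvNewOf, pvWriteAll], by simp [pvNewOf], by simpa [pvNewOf] using hnd, by simp [pvNewOf]⟩
  | cons k ks ih =>
    intro hks dist vis qa hlen hv hvmem hnd hbnd hdv
    have hk := hks k (by simp)
    have hks' : ∀ k' ∈ ks, 1 ≤ k' ∧ k' < n := fun k' h => hks k' (by simp [h])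
    set nxt := PySem.List.pyGetD (PySem.List.pyGetD t v []) k 0 with hnxt
    have hnb := pv_nxt_bound t n v k hpre hv hk
    by_cases hm : nxt ∈ vis
    · have hc : PySem.Set.contains vis nxt = true := by
        simp [PySem.Set.contains, hm]
      have hA : (k :: ks).foldl (pvAInner t v) (dist, vis, qa)
          = ks.foldl (pvAInner t v) (dist, vis, qa) := by
        simp only [List.foldl_cons, pvAInner, ← hnxt, hc, if_true]
      have hN : pvNewOf ((k :: ks).map (fun k => PySem.List.pyGetD (PySem.List.pyGetD t v []) k 0)) vis
          = pvNewOf (ks.map (fun k => PySem.List.pyGetD (PySem.List.pyGetD t v []) k 0)) vis := by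
        simp only [List.map_cons, pvNewOf, List.foldl_cons, pvNewStep, ← hnxt, hc, if_true]
      rw [hA, hN]
      exact ih hks' dist vis qa hlen hv hvmem hnd hbnd hdv
    · have hc : PySem.Set.contains vis nxt = false := by
        simp only [PySem.Set.contains]
        simpa using hm
      have hvne : v ≠ nxt := fun h => hm (by rw [← h]; exact hvmem)
      have hnl : nxt.toNat < dist.length := by omega
      have hadd : PySem.Set.add vis nxt = vis ++ [nxt] := by
        simp [PySem.Set.add, hm]
      have hlen' : (PySem.List.pySetD dist nxt (level + 1)).length = n.toNat := by
        rw [PySem.List.length_pySetD]; exact hlen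
      have hvmem' : v ∈ vis ++ [nxt] := by simp [hvmem]
      have hnd' : (vis ++ [nxt]).Nodup := by
        rw [List.nodup_append]
        refine ⟨hnd, by simp, ?_⟩
        intro a ha b hb
        simp only [List.mem_singleton] at hb
        subst hb
        exact fun h => hm (by rw [← h]; exact ha)
      have hbnd' : ∀ x ∈ vis ++ [nxt], 0 ≤ x ∧ x < n := by
        intro x hx
        rcases List.mem_append.mp hx with h | h
        · exact hbnd x h
        · simp at h; subst h; exact hnb
      have hdv' : PySem.List.pyGetD (PySem.List.pySetD dist nxt (level + 1)) v 999 = level := by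
        rw [pv_getD_setD dist nxt v _ hnb.1 hv.1 hnl, if_neg hvne]; exact hdv
      obtain ⟨heqA, hvis, hnd2, hbn2⟩ :=
        ih hks' (PySem.List.pySetD dist nxt (level + 1)) (vis ++ [nxt]) (qa ++ [nxt])
          hlen' hv hvmem' hnd' hbnd' hdv'
      set nf' := (pvNewOf (ks.map (fun k => PySem.List.pyGetD (PySem.List.pyGetD t v []) k 0)) (vis ++ [nxt])).2 with hnf'
      have hNcons : pvNewOf ((k :: ks).map (fun k => PySem.List.pyGetD (PySem.List.pyGetD t v []) k 0)) vis
          = ((pvNewOf (ks.map (fun k => PySem.List.pyGetD (PySem.List.pyGetD t v []) k 0)) (vis ++ [nxt])).1, nxt :: nf') := by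
        simp only [List.map_cons, pvNewOf, List.foldl_cons, pvNewStep, hc, Bool.false_eq_true,
          if_false, hadd, ← hnxt]
        rw [show ((vis ++ [nxt], ([] : List Int) ++ [nxt]) : PySem.Set Int × List Int)
            = (vis ++ [nxt], [nxt]) from by simp]
        rw [pv_newOf_shift (ks.map (fun k => PySem.List.pyGetD (PySem.List.pyGetD t v []) k 0)) (vis ++ [nxt]) [nxt]]
        rfl
      have hA : (k :: ks).foldl (pvAInner t v) (dist, vis, qa)
          = ks.foldl (pvAInner t v)
              (PySem.List.pySetD dist nxt (level + 1), vis ++ [nxt], qa ++ [nxt]) := by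
        simp only [List.foldl_cons, pvAInner, ← hnxt, hc, Bool.false_eq_true, if_false, hadd, hdv]
      constructor
      · rw [hA, heqA, hNcons]
        refine Prod.ext ?_ (Prod.ext ?_ ?_) <;> simp [pvWriteAll, List.append_assoc]
      refine ⟨?_, ?_, ?_⟩
      · rw [hNcons]
        show (pvNewOf (ks.map (fun k => PySem.List.pyGetD (PySem.List.pyGetD t v []) k 0)) (vis ++ [nxt])).1 = vis ++ nxt :: nf'
        rw [hvis]; simp
      · rw [hNcons]
        show (vis ++ nxt :: nf').Nodup
        have : vis ++ nxt :: nf' = (vis ++ [nxt]) ++ nf' := by simp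
        rw [this]; exact hnd2
      · rw [hNcons]
        intro x hx
        rcases List.mem_cons.mp hx with h | h
        · subst h; exact hnb
        · exact hbn2 x h

theorem pv_aloop_done (t : List (List Int)) (n : Int) (f : Nat) (dist vis queue : List Int)
    (qi : Nat) (h : queue.length ≤ qi) : pvALoop t n f dist vis queue qi = dist := by
  cases f with
  | zero => rfl
  | succ f => simp [pvALoop, Nat.not_lt.mpr h]

-- processing one whole level segment of A's queue equals one candidates+filter pass of B
theorem pv_block (t : List (List Int)) (n level : Int) (hpre : Pre_compute_bfs t n) :
    ∀ (cur pre tail dist vis : List Int) (f : Nat),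
    dist.length = n.toNat →
    (∀ v ∈ cur, v ∈ vis) → (∀ v ∈ cur, 0 ≤ v ∧ v < n) →
    vis.Nodup → (∀ x ∈ vis, 0 ≤ x ∧ x < n) →
    (∀ v ∈ cur, PySem.List.pyGetD dist v 999 = level) →
    pvALoop t n (cur.length + f) dist vis (pre ++ cur ++ tail) pre.length =
      pvALoop t n f (pvWriteAll dist (pvNewOf (pvCand t n cur) vis).2 (level + 1))
        (vis ++ (pvNewOf (pvCand t n cur) vis).2)
        (pre ++ cur ++ tail ++ (pvNewOf (pvCand t n cur) vis).2)
        (pre.length + cur.length) ∧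
    (pvNewOf (pvCand t n cur) vis).1 = vis ++ (pvNewOf (pvCand t n cur) vis).2 ∧
    (vis ++ (pvNewOf (pvCand t n cur) vis).2).Nodup ∧
    (∀ x ∈ (pvNewOf (pvCand t n cur) vis).2, 0 ≤ x ∧ x < n) := by
  intro cur
  induction cur with
  | nil =>
    intro pre tail dist vis f hlen _ _ hnd _ _
    refine ⟨by simp [pvCand, pvNewOf, pvWriteAll], by simp [pvCand, pvNewOf],
      by simpa [pvCand, pvNewOf] using hnd, by simp [pvCand, pvNewOf]⟩
  | cons v rest ih =>
    intro pre tail dist vis f hlen hcur hcb hnd hbnd hdl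
    have hv := hcb v (by simp)
    have hvm := hcur v (by simp)
    have hdv := hdl v (by simp)
    have hks : ∀ k ∈ PySem.List.pyRange 1 n, 1 ≤ k ∧ k < n := by
      intro k hk; exact (PySem.List.mem_pyRange_one).mp hk
    obtain ⟨heqA, hvis1, hnd1, hbn1⟩ :=
      pv_inner t n v level hpre (PySem.List.pyRange 1 n) hks dist vis
        (pre ++ v :: rest ++ tail) hlen hv hvm hnd hbnd hdv
    set nf1 := (pvNewOf ((PySem.List.pyRange 1 n).map (fun k => PySem.List.pyGetD (PySem.List.pyGetD t v []) k 0)) vis).2 with hnf1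
    set d1 := pvWriteAll dist nf1 (level + 1) with hd1
    -- candidates decompose per frontier node
    have hcand : pvCand t n (v :: rest)
        = (PySem.List.pyRange 1 n).map (fun k => PySem.List.pyGetD (PySem.List.pyGetD t v []) k 0)
          ++ pvCand t n rest := by
      simp [pvCand]
    have hsplit := pv_newOf_append
      ((PySem.List.pyRange 1 n).map (fun k => PySem.List.pyGetD (PySem.List.pyGetD t v []) k 0))
      (pvCand t n rest) vis
    -- one step of A's loop
    have hlt : pre.length < (pre ++ v :: rest ++ tail).length := by simp
    have hget : (pre ++ v :: rest ++ tail)[pre.length]'hlt = v := by simp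
    have hnfb : ∀ w ∈ nf1, 0 ≤ w ∧ w.toNat < dist.length := by
      intro w hw; have := hbn1 w hw; exact ⟨this.1, by omega⟩
    have hlen1 : d1.length = n.toNat := by rw [hd1, pv_writeAll_length]; exact hlen
    have hstep : pvALoop t n ((v :: rest).length + f) dist vis (pre ++ v :: rest ++ tail) pre.length
        = pvALoop t n (rest.length + f) d1 (vis ++ nf1)
            ((pre ++ v :: rest ++ tail) ++ nf1) (pre.length + 1) := by
      have hfuel : (v :: rest).length + f = (rest.length + f) + 1 := by simp; omega
      rw [hfuel]
      simp only [pvALoop, dif_pos hlt, hget]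
      rw [heqA]
    -- invariants for the rest of the segment
    have hdisj : ∀ w ∈ vis, w ∉ nf1 := by
      intro w hw hwn
      exact (List.disjoint_of_nodup_append hnd1) hw hwn
    have hcur' : ∀ w ∈ rest, w ∈ vis ++ nf1 := fun w hw => by
      simp [hcur w (by simp [hw])]
    have hcb' : ∀ w ∈ rest, 0 ≤ w ∧ w < n := fun w hw => hcb w (by simp [hw])
    have hbnd' : ∀ x ∈ vis ++ nf1, 0 ≤ x ∧ x < n := by
      intro x hx
      rcases List.mem_append.mp hx with h | h
      · exact hbnd x h
      · exact hbn1 x h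
    have hdl' : ∀ w ∈ rest, PySem.List.pyGetD d1 w 999 = level := by
      intro w hw
      have hwv := hcur w (by simp [hw])
      rw [hd1, pv_getD_writeAll nf1 dist (level+1) w hnfb (hcb w (by simp [hw])).1,
        if_neg (hdisj w hwv)]
      exact hdl w (by simp [hw])
    obtain ⟨haloop2, hvis2, hnd2, hbn2⟩ :=
      ih (pre ++ [v]) (tail ++ nf1) d1 (vis ++ nf1) f hlen1 hcur' hcb' hnd1 hbnd' hdl'
    set nf2 := (pvNewOf (pvCand t n rest) (vis ++ nf1)).2 with hnf2
    have hfull : pvNewOf (pvCand t n (v :: rest)) vis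
        = ((pvNewOf (pvCand t n rest) (vis ++ nf1)).1, nf1 ++ nf2) := by
      rw [hcand, hsplit, hvis1]
    refine ⟨?_, ?_, ?_, ?_⟩
    · rw [hstep, hfull]
      show pvALoop t n (rest.length + f) d1 (vis ++ nf1)
          ((pre ++ v :: rest ++ tail) ++ nf1) (pre.length + 1)
        = pvALoop t n f (pvWriteAll dist (nf1 ++ nf2) (level + 1)) (vis ++ (nf1 ++ nf2))
            (pre ++ v :: rest ++ tail ++ (nf1 ++ nf2)) (pre.length + (v :: rest).length)
      have h1 : (pre ++ v :: rest ++ tail) ++ nf1 = (pre ++ [v]) ++ rest ++ (tail ++ nf1) := by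
        simp
      have h2 : pre.length + 1 = (pre ++ [v]).length := by simp
      rw [h1, h2, haloop2, pv_writeAll_append, ← hd1]
      congr 1 <;> (simp; try omega)
    · rw [hfull]
      show (pvNewOf (pvCand t n rest) (vis ++ nf1)).1 = vis ++ (nf1 ++ nf2)
      rw [hvis2]; simp
    · rw [hfull]
      show (vis ++ (nf1 ++ nf2)).Nodup
      rw [← List.append_assoc]; exact hnd2
    · rw [hfull]
      intro x hx
      rcases List.mem_append.mp hx with h | h
      · exact hbn1 x h
      · exact hbn2 x h

-- main simulation: A's queue loop from a level segment = write B's remaining layers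
theorem pv_outer (t : List (List Int)) (n : Int) (hpre : Pre_compute_bfs t n) :
    ∀ (fB fA : Nat) (cur pre dist vis : List Int) (level : Int),
    dist.length = n.toNat →
    (∀ v ∈ cur, v ∈ vis) → (∀ v ∈ cur, 0 ≤ v ∧ v < n) →
    vis.Nodup → (∀ x ∈ vis, 0 ≤ x ∧ x < n) →
    (∀ v ∈ cur, PySem.List.pyGetD dist v 999 = level) →
    (cur ≠ [] → cur.length + (n.toNat - vis.length) ≤ fA) →
    (cur ≠ [] → n.toNat - vis.length + 1 ≤ fB) →
    pvALoop t n fA dist vis (pre ++ cur) pre.length =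
      pvW dist (pvLayersLoop t n fB vis cur) level := by
  intro fB
  induction fB with
  | zero =>
    intro fA cur pre dist vis level hlen hcur hcb hnd hbnd hdl hfA hfB
    by_cases hcur0 : cur = []
    · subst hcur0
      rw [pv_aloop_done t n fA dist vis (pre ++ []) pre.length (by simp)]
      simp [pvLayersLoop, pvW, pvWriteAll]
    · exact absurd (hfB hcur0) (by omega)
  | succ fB ih =>
    intro fA cur pre dist vis level hlen hcur hcb hnd hbnd hdl hfA hfB
    by_cases hcur0 : cur = []
    · subst hcur0
      rw [pv_aloop_done t n fA dist vis (pre ++ []) pre.length (by simp)]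
      simp [pvLayersLoop, pvW, pvWriteAll]
    · have hfa := hfA hcur0
      obtain ⟨haloop, hvis, hnd2, hbn2⟩ :=
        pv_block t n level hpre cur pre [] dist vis (fA - cur.length) hlen hcur hcb hnd hbnd hdl
      set nf := (pvNewOf (pvCand t n cur) vis).2 with hnf
      set d2 := pvWriteAll dist nf (level + 1) with hd2
      have hnfb : ∀ w ∈ nf, 0 ≤ w ∧ w.toNat < dist.length := by
        intro w hw; have := hbn2 w hw; exact ⟨this.1, by omega⟩
      have hA : pvALoop t n fA dist vis (pre ++ cur) pre.length
          = pvALoop t n (fA - cur.length) d2 (vis ++ nf) ((pre ++ cur) ++ nf)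
              ((pre ++ cur).length) := by
        conv_lhs => rw [show fA = cur.length + (fA - cur.length) from by omega,
          show pre ++ cur = pre ++ cur ++ [] from by simp]
        rw [haloop]
        congr 1 <;> simp
      have hne : cur.isEmpty = false := by simpa [List.isEmpty_iff] using hcur0
      have hB : pvLayersLoop t n (fB + 1) vis cur
          = cur :: pvLayersLoop t n fB (vis ++ nf) nf := by
        simp only [pvLayersLoop, hne, Bool.false_eq_true, if_false]
        rw [hvis]
      have hWcur : pvWriteAll dist cur level = dist := by
        apply pv_writeAll_noop
        intro w hw
        have h1 := hcb w hw
        refine ⟨h1.1, by omega, hdl w hw⟩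
      have hnddisj : ∀ w ∈ vis, w ∉ nf := by
        intro w hw hwn
        exact (List.disjoint_of_nodup_append hnd2) hw hwn
      have hbnd2 : ∀ x ∈ vis ++ nf, 0 ≤ x ∧ x < n := by
        intro x hx
        rcases List.mem_append.mp hx with h | h
        · exact hbnd x h
        · exact hbn2 x h
      have hle : (vis ++ nf).length ≤ n.toNat := pv_nodup_length_le _ n hnd2 hbnd2
      simp only [List.length_append] at hle
      have hdl2 : ∀ w ∈ nf, PySem.List.pyGetD d2 w 999 = level + 1 := by
        intro w hw
        rw [hd2, pv_getD_writeAll nf dist (level+1) w hnfb (hbn2 w hw).1, if_pos hw]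
      have hlen2 : d2.length = n.toNat := by rw [hd2, pv_writeAll_length]; exact hlen
      rw [hA, hB]
      show pvALoop t n (fA - cur.length) d2 (vis ++ nf) ((pre ++ cur) ++ nf) ((pre ++ cur).length)
        = pvW dist (cur :: pvLayersLoop t n fB (vis ++ nf) nf) level
      have hWstep : pvW dist (cur :: pvLayersLoop t n fB (vis ++ nf) nf) level
          = pvW dist (pvLayersLoop t n fB (vis ++ nf) nf) (level + 1) := by
        show pvW (pvWriteAll dist cur level) (pvLayersLoop t n fB (vis ++ nf) nf) (level + 1)
          = pvW dist (pvLayersLoop t n fB (vis ++ nf) nf) (level + 1)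
        rw [hWcur]
      rw [hWstep]
      have hLcons : ∃ rest, pvLayersLoop t n fB (vis ++ nf) nf = nf :: rest := by
        cases fB with
        | zero => exact ⟨[], rfl⟩
        | succ fB =>
          by_cases hnfe : nf.isEmpty
          · exact ⟨[], by simp [pvLayersLoop, hnfe]⟩
          · exact ⟨pvLayersLoop t n fB (pvNewOf (pvCand t n nf) (vis ++ nf)).1
                (pvNewOf (pvCand t n nf) (vis ++ nf)).2,
              by simp [pvLayersLoop, hnfe]⟩
      have hWd2 : pvW dist (pvLayersLoop t n fB (vis ++ nf) nf) (level + 1)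
          = pvW d2 (pvLayersLoop t n fB (vis ++ nf) nf) (level + 1) := by
        obtain ⟨rest, hrest⟩ := hLcons
        rw [hrest]
        show pvW (pvWriteAll dist nf (level + 1)) rest (level + 1 + 1)
          = pvW (pvWriteAll d2 nf (level + 1)) rest (level + 1 + 1)
        rw [pv_writeAll_noop nf d2 (level + 1) (by
          intro w hw
          refine ⟨(hbn2 w hw).1, by rw [hlen2]; have := hbn2 w hw; omega, hdl2 w hw⟩), hd2]
      rw [hWd2]
      refine ih (fA - cur.length) nf (pre ++ cur) d2 (vis ++ nf) (level + 1) hlen2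
        (fun w hw => by simp [hw]) (fun w hw => hbn2 w hw) hnd2 hbnd2 hdl2 ?_ ?_
      · intro hnf0
        have h1 : 0 < nf.length := List.length_pos_iff.mpr hnf0
        have h2 : 0 < cur.length := List.length_pos_iff.mpr hcur0
        simp only [List.length_append]
        omega
      · intro hnf0
        have h1 : 0 < nf.length := List.length_pos_iff.mpr hnf0
        have h3 := hfB hcur0
        simp only [List.length_append]
        omega

-- ===== VERDICT (by name: the statement is the Claim_ definition above) =====
theorem compute_bfs_spec : Claim_equal_compute_bfs := by
  intro t n _ hpre
  show compute_bfs t n = compute_bfs_alt t n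
  have hn : 0 < n := hpre.1
  have hofl : PySem.Set.ofList [(0 : Int)] = [(0 : Int)] := rfl
  unfold compute_bfs compute_bfs_alt
  rw [hofl, pv_enum_fold]
  have hlen0 : (PySem.List.pySetD (List.replicate n.toNat 999) 0 (0 : Int)).length = n.toNat := by
    rw [PySem.List.length_pySetD, List.length_replicate]
  have hd0 : PySem.List.pyGetD (PySem.List.pySetD (List.replicate n.toNat 999) 0 (0 : Int)) 0 999 = 0 := by
    rw [pv_getD_setD _ 0 0 0 le_rfl le_rfl (by simp; omega), if_pos rfl]
  have h := pv_outer t n hpre (n.toNat + 1) (n.toNat + 1) [0] []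
    (PySem.List.pySetD (List.replicate n.toNat 999) 0 0) [0] 0 hlen0
    (by intro v hv; simpa using hv)
    (by intro v hv; simp at hv; subst hv; omega)
    (by simp)
    (by intro x hx; simp at hx; subst hx; omega)
    (by intro v hv; simp at hv; subst hv; exact hd0)
    (by intro _; simp; omega)
    (by intro _; omega)
  simpa using h
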